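-- pv_equiv track=rewrite | github.com/chilcano/how-tos | src/python_challenges/02_secure_fragment_allocation2.py | distribute_fragments
-- ===== SOURCE A (Python) =====
-- def distribute_fragments(datacenter_risks, total_fragments):
--     # Convert the datacenter_risks dictionary to a list of tuples and sort by risk
--     sorted_datacenter_risks = sorted(datacenter_risks.items(), key=lambda x: x[1], reverse=False)
--
--     # Initialize the count of fragments in each datacenter
--     fragments_distribution = {key: 0 for key in datacenter_risks.keys()}
--
--     # Distribute the fragments
--     for _ in range(total_fragments):
--         min_risk_key = sorted_datacenter_risks[0][0]
--         min_total_risk = (sorted_datacenter_risks[0][1] ** (fragments_distribution[min_risk_key] + 1))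
--         for key, risk in sorted_datacenter_risks:
--             potential_risk = (risk ** (fragments_distribution[key] + 1))
--             if potential_risk < min_total_risk:
--                 min_total_risk = potential_risk
--                 min_risk_key = key
--
--         # Allocate an fragment to the datacenter with the minimum increased risk
--         fragments_distribution[min_risk_key] += 1
--
--     # Calculate the total risk
--     total_cost = sum(datacenter_risks[key] ** fragments_distribution[key] for key in fragments_distribution)
--
--     # Create a sorted dict
--     sorted_datacenter_by_risk = {k: v for k, v in sorted_datacenter_risks}
--
--     return fragments_distribution, total_cost, sorted_datacenter_by_risk
-- ===== SOURCE B (Python) =====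
-- def distribute_fragments(datacenter_risks, total_fragments):
--     # Incremental priority queue instead of rescanning every datacenter each step:
--     # keep (current potential risk, sorted index) pairs in ascending order, pop the
--     # head, bump that datacenter's count, and re-insert its next potential.
--     items = sorted(datacenter_risks.items(), key=lambda x: x[1])
--     counts = [0] * len(items)
--     # initial potentials are risk**1 = risk, so the enumerated list is already sorted
--     pq = [(risk, i) for i, (_, risk) in enumerate(items)]
--     for _ in range(total_fragments):
--         _, i = pq.pop(0)
--         counts[i] += 1
--         new = (items[i][1] ** (counts[i] + 1), i)
--         j = 0
--         while j < len(pq) and pq[j] < new: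
--             j += 1
--         pq.insert(j, new)
--     pos = {key: i for i, (key, _) in enumerate(items)}
--     fragments_distribution = {key: counts[pos[key]] for key in datacenter_risks}
--     total_cost = sum(risk ** counts[pos[key]] for key, risk in datacenter_risks.items())
--     sorted_datacenter_by_risk = dict(items)
--     return fragments_distribution, total_cost, sorted_datacenter_by_risk
-- ===== Notes on version B (the rewrite author's own statement) =====
-- stated objective: faster
-- what changed: Instead of rescanning all n datacenters each step and recomputing risk**(count+1) for every one, B keeps an ordered priority queue of (current potential risk, sorted index) pairs, pops the minimum, and re-inserts that datacenter's single updated potential.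
-- outside the precondition, e.g. on distribute_fragments({}, 1): A raises IndexError, B raises IndexError
import Mathlib
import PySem

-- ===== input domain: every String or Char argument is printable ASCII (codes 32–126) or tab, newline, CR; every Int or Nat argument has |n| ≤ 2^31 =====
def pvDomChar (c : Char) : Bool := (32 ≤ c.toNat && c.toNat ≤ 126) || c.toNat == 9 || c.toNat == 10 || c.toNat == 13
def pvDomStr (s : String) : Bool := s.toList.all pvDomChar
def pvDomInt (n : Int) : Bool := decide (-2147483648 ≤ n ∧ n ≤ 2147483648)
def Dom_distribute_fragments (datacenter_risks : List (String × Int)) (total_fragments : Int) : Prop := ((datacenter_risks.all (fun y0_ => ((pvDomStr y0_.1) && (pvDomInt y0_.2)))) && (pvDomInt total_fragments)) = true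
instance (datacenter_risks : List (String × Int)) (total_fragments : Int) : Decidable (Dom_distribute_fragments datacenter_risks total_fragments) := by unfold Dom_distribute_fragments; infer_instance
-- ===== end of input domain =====

-- B replaces A's per-fragment rescan of every datacenter (recomputing risk**(count+1) for each)
-- by an incrementally maintained ascending priority queue of (current potential risk, sorted index):
-- pop the head, bump that count, re-insert its next potential. Same results; one power per step.


-- ===== PORT A =====
-- A: sort once, then for each fragment rescan every datacenter recomputing risk**(count+1).
def distribute_fragments (datacenter_risks : List (String × Int)) (total_fragments : Int) :
    (List (String × Int)) × Int × (List (String × Int)) :=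
  let d := PySem.Dict.ofList datacenter_risks
  let sorted_dr := PySem.List.sorted d.items (fun x => x.2) false
  let dist0 : PySem.Dict String Int :=
    d.keys.foldl (fun acc k => acc.insert k 0) PySem.Dict.empty
  let dist := (PySem.List.pyRange 0 total_fragments 1).foldl (fun dist _ =>
      let first := PySem.List.pyGetD sorted_dr 0 ("", 0)   -- sorted_datacenter_risks[0]; IndexError excluded by Pre_
      let init : Int × String := (first.2 ^ (dist.getD first.1 0 + 1).toNat, first.1)
      let mm := sorted_dr.foldl (fun (acc : Int × String) kr =>
          let pot := kr.2 ^ (dist.getD kr.1 0 + 1).toNat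
          if pot < acc.1 then (pot, kr.1) else acc) init
      dist.modify mm.2 0 (· + 1)) dist0
  let total_cost := (dist.keys.map (fun k => d.getD k 0 ^ (dist.getD k 0).toNat)).sum
  (dist.items, total_cost, (PySem.Dict.ofList sorted_dr).items)

-- ===== PORT B =====
-- Source B's Python tuple comparison (pot, i) < (pot', i')
def pyPairLt (a b : Int × Int) : Bool := a.1 < b.1 || (a.1 == b.1 && a.2 < b.2)

-- Source B's while-loop insertion: skip entries smaller than x, insert before the first not-smaller one
def insAsc (x : Int × Int) : List (Int × Int) → List (Int × Int)
  | [] => [x]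
  | y :: t => if pyPairLt y x then y :: insAsc x t else x :: y :: t

-- B: ascending priority queue of (current potential, sorted index); pop head, bump count, re-insert.
def distribute_fragments_alt (datacenter_risks : List (String × Int)) (total_fragments : Int) :
    (List (String × Int)) × Int × (List (String × Int)) :=
  let d := PySem.Dict.ofList datacenter_risks
  let items := PySem.List.sorted d.items (fun x => x.2) false
  let counts0 : List Int := List.replicate items.length 0
  let pq0 : List (Int × Int) := (PySem.List.enumerate items).map (fun p => (p.2.2, p.1))
  let st := (PySem.List.pyRange 0 total_fragments 1).foldl (fun st _ =>
      match st.2 with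
      | [] => st            -- pq.pop(0) raises IndexError here in Source B; excluded by Pre_
      | (_, i) :: rest =>
        let counts' := st.1.set i.toNat (st.1.getD i.toNat 0 + 1)
        let nw : Int × Int :=
          ((PySem.List.pyGetD items i ("", 0)).2 ^ (counts'.getD i.toNat 0 + 1).toNat, i)
        (counts', insAsc nw rest)) (counts0, pq0)
  let counts := st.1
  let pos : PySem.Dict String Int :=
    (PySem.List.enumerate items).foldl (fun acc p => acc.insert p.2.1 p.1) PySem.Dict.empty
  let dist := d.keys.foldl
      (fun acc k => acc.insert k (counts.getD (pos.getD k 0).toNat 0)) PySem.Dict.empty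
  let total_cost :=
    (d.items.map (fun kr => kr.2 ^ (counts.getD (pos.getD kr.1 0).toNat 0).toNat)).sum
  (dist.items, total_cost, (PySem.Dict.ofList items).items)

-- ===== PRECONDITION & SPEC =====
-- Pre_ excludes exactly the inputs where A raises IndexError: an empty dict with total_fragments ≥ 1
-- (sorted_datacenter_risks[0] in A, pq.pop(0) in B).
def Pre_distribute_fragments (datacenter_risks : List (String × Int)) (total_fragments : Int) : Prop :=
  datacenter_risks = [] → total_fragments ≤ 0
instance (datacenter_risks : List (String × Int)) (total_fragments : Int) : Decidable (Pre_distribute_fragments datacenter_risks total_fragments) := by unfold Pre_distribute_fragments; infer_instance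
def pvWitness_distribute_fragments : (List (String × Int)) × Int := ([("a", 2), ("b", 3)], 4)
def Spec_distribute_fragments (datacenter_risks : List (String × Int)) (total_fragments : Int) (out : (List (String × Int)) × Int × (List (String × Int))) : Prop := out = distribute_fragments_alt datacenter_risks total_fragments
instance (datacenter_risks : List (String × Int)) (total_fragments : Int) (out : (List (String × Int)) × Int × (List (String × Int))) : Decidable (Spec_distribute_fragments datacenter_risks total_fragments out) := by unfold Spec_distribute_fragments; infer_instance

-- ===== CLAIM (what is proved, stated in full; the proofs are below) =====
def Claim_equal_distribute_fragments : Prop := ∀ (datacenter_risks : List (String × Int)) (total_fragments : Int), Dom_distribute_fragments datacenter_risks total_fragments → Pre_distribute_fragments datacenter_risks total_fragments → Spec_distribute_fragments datacenter_risks total_fragments (distribute_fragments datacenter_risks total_fragments)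

-- ===== LEMMAS AND PROOFS =====

-- Python's lexicographic < on pairs, as a Prop
def Lt2 (a b : Int × Int) : Prop := a.1 < b.1 ∨ (a.1 = b.1 ∧ a.2 < b.2)

theorem pyPairLt_iff (a b : Int × Int) : pyPairLt a b = true ↔ Lt2 a b := by
  simp [pyPairLt, Lt2]

theorem Lt2_trans {a b c : Int × Int} (h1 : Lt2 a b) (h2 : Lt2 b c) : Lt2 a c := by
  simp only [Lt2] at *; omega

theorem Lt2_flip {a b : Int × Int} (hne : a ≠ b) (h : ¬ Lt2 b a) : Lt2 a b := by
  have hne' : a.1 ≠ b.1 ∨ a.2 ≠ b.2 := by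
    by_contra hc; push Not at hc; exact hne (Prod.ext hc.1 hc.2)
  simp only [Lt2] at *
  omega

-- the current potential risk of sorted index i
def potOf (xs : List (String × Int)) (cs : List Int) (i : Nat) : Int :=
  (xs.getD i ("", 0)).2 ^ ((cs.getD i 0) + 1).toNat

-- the reference (unsorted) contents of B's priority queue
def pqOf (xs : List (String × Int)) (cs : List Int) : List (Int × Int) :=
  (List.range xs.length).map (fun i => (potOf xs cs i, (i : Int)))

-- leftmost argmin of potOf over {0} ∪ [0, t), as A's scan computes it
def bestIdx (xs : List (String × Int)) (cs : List Int) : Nat → Nat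
  | 0 => 0
  | t + 1 => if potOf xs cs t < potOf xs cs (bestIdx xs cs t) then t else bestIdx xs cs t

theorem bestIdx_lt (xs : List (String × Int)) (cs : List Int) :
    ∀ t, 1 ≤ t → bestIdx xs cs t < t := by
  intro t
  induction t with
  | zero => omega
  | succ t ih =>
    intro _
    simp only [bestIdx]
    split
    · omega
    · rcases Nat.eq_zero_or_pos t with h0 | h0
      · subst h0; simp [bestIdx]
      · exact Nat.lt_succ_of_lt (ih h0)

theorem bestIdx_min (xs : List (String × Int)) (cs : List Int) :
    ∀ t, ∀ j < t, potOf xs cs (bestIdx xs cs t) ≤ potOf xs cs j := by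
  intro t
  induction t with
  | zero => omega
  | succ t ih =>
    intro j hj
    simp only [bestIdx]
    split
    · rename_i h
      rcases Nat.lt_succ_iff_lt_or_eq.mp hj with hj' | hj'
      · exact le_trans (le_of_lt h) (ih j hj')
      · subst hj'; exact le_refl _
    · rename_i h
      rcases Nat.lt_succ_iff_lt_or_eq.mp hj with hj' | hj'
      · exact ih j hj'
      · subst hj'; omega

theorem bestIdx_strict (xs : List (String × Int)) (cs : List Int) :
    ∀ t, ∀ j < bestIdx xs cs t, potOf xs cs (bestIdx xs cs t) < potOf xs cs j := by
  intro t
  induction t with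
  | zero => simp [bestIdx]
  | succ t ih =>
    intro j hj
    simp only [bestIdx] at *
    split
    · rename_i h
      split at hj
      · exact lt_of_lt_of_le h (bestIdx_min xs cs t j hj)
      · omega
    · rename_i h
      split at hj
      · omega
      · exact ih j hj

theorem argmin_unique (xs : List (String × Int)) (cs : List Int) (n a b : Nat)
    (ha1 : a < n) (hb1 : b < n)
    (ha2 : ∀ j < n, potOf xs cs a ≤ potOf xs cs j)
    (ha3 : ∀ j < a, potOf xs cs a < potOf xs cs j)
    (hb2 : ∀ j < n, potOf xs cs b ≤ potOf xs cs j)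
    (hb3 : ∀ j < b, potOf xs cs b < potOf xs cs j) : a = b := by
  rcases Nat.lt_trichotomy a b with h | h | h
  · have := hb3 a h; have := ha2 b hb1; omega
  · exact h
  · have := ha3 b h; have := hb2 a ha1; omega

-- generic lock-step simulation of two foldl loops over the same list
theorem foldl_sim {σ τ : Type} (R : σ → τ → Prop) (fA : σ → Int → σ) (fB : τ → Int → τ)
    (h : ∀ a b x, R a b → R (fA a x) (fB b x)) :
    ∀ (l : List Int) a b, R a b → R (l.foldl fA a) (l.foldl fB b) := by
  intro l
  induction l with
  | nil => intro a b hab; exact hab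
  | cons x t ih => intro a b hab; exact ih _ _ (h _ _ _ hab)

theorem insAsc_perm (x : Int × Int) (l : List (Int × Int)) : (insAsc x l).Perm (x :: l) := by
  induction l with
  | nil => simp [insAsc]
  | cons y t ih =>
    simp only [insAsc]
    split
    · exact (ih.cons y).trans (List.Perm.swap x y t)
    · exact List.Perm.refl _

theorem insAsc_pairwise (x : Int × Int) (l : List (Int × Int)) (hl : l.Pairwise Lt2)
    (hne : ∀ y ∈ l, y ≠ x) : (insAsc x l).Pairwise Lt2 := by
  induction l with
  | nil => simp [insAsc]
  | cons y t ih =>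
    obtain ⟨hy, ht⟩ := List.pairwise_cons.mp hl
    simp only [insAsc]
    split
    · rename_i hlt
      refine List.Pairwise.cons ?_ (ih ht (fun z hz => hne z (List.mem_cons_of_mem _ hz)))
      intro z hz
      rcases List.mem_cons.mp (((insAsc_perm x t).mem_iff).mp hz) with h | h
      · subst h; exact (pyPairLt_iff y z).mp hlt
      · exact hy z h
    · rename_i hnlt
      have hxy : Lt2 x y := Lt2_flip (fun he => hne y List.mem_cons_self he.symm)
        (fun hc => hnlt ((pyPairLt_iff y x).mpr hc))
      refine List.Pairwise.cons ?_ hl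
      intro z hz
      rcases List.mem_cons.mp hz with h | h
      · subst h; exact hxy
      · exact Lt2_trans hxy (hy z h)

theorem enumerate_eq (xs : List (String × Int)) : ∀ (s : Int),
    PySem.List.enumerate xs s
      = (List.range xs.length).map (fun (j : Nat) => (s + (j : Int), xs.getD j ("", 0))) := by
  induction xs with
  | nil => intro s; simp [PySem.List.enumerate]
  | cons x t ih =>
    intro s
    rw [show PySem.List.enumerate (x :: t) s = (s, x) :: PySem.List.enumerate t (s + 1) from rfl,
        ih (s + 1), List.length_cons, List.range_succ_eq_map, List.map_cons, List.map_map]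
    refine congrArg₂ _ (by simp) (List.map_congr_left ?_)
    intro j _
    simp only [Function.comp]
    refine Prod.ext ?_ rfl
    push_cast; ring

-- a foldl over a list is a foldl over its index range
theorem foldl_list_eq_range {α σ : Type} (d : α) :
    ∀ (xs : List α) (g : σ → α → σ) (init : σ),
    xs.foldl g init = (List.range xs.length).foldl (fun acc j => g acc (xs.getD j d)) init := by
  intro xs
  induction xs with
  | nil => intro g init; simp
  | cons x t ih =>
    intro g init
    rw [List.foldl_cons, List.length_cons, List.range_succ_eq_map, List.foldl_cons,
        List.foldl_map, ih]
    simp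

theorem scanA_spec (xs : List (String × Int)) (cs : List Int) :
    ∀ t,
    (List.range t).foldl (fun (acc : Int × String) j =>
        if potOf xs cs j < acc.1 then (potOf xs cs j, (xs.getD j ("", 0)).1) else acc)
      (potOf xs cs 0, (xs.getD 0 ("", 0)).1)
    = (potOf xs cs (bestIdx xs cs t), (xs.getD (bestIdx xs cs t) ("", 0)).1) := by
  intro t
  induction t with
  | zero => rfl
  | succ t ih =>
    rw [List.range_succ, List.foldl_append, ih]
    simp only [List.foldl_cons, List.foldl_nil, bestIdx]
    split <;> rfl

-- a dict with nodup keys is its key list paired with its lookups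
theorem dict_items_eq (d : PySem.Dict String Int) (h : d.keys.Nodup) :
    d.items = d.keys.map (fun k => (k, d.getD k 0)) := by
  apply List.ext_getElem
  · simp [PySem.Dict.keys]
  · intro j h1 h2
    have hmem : d.items[j] ∈ d.items := List.getElem_mem _
    have hgd : d.getD d.items[j].1 0 = d.items[j].2 :=
      PySem.Dict.getD_of_mem_items d (by rw [Prod.mk.eta]; exact hmem) h 0
    simp only [PySem.Dict.keys, List.getElem_map]
    exact Prod.ext rfl hgd.symm

-- simulation invariant between A's dict state and B's (counts, pq) state
def SimR (xs : List (String × Int)) (kList : List String)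
    (dist : PySem.Dict String Int) (st : List Int × List (Int × Int)) : Prop :=
  dist.keys = kList ∧
  st.1.length = xs.length ∧
  (∀ i, i < xs.length → dist.getD ((xs.getD i ("", 0)).1) 0 = st.1.getD i 0) ∧
  st.2.Perm (pqOf xs st.1) ∧
  st.2.Pairwise Lt2


theorem getD_set_self (cs : List Int) (i : Nat) (v : Int) (h : i < cs.length) :
    (cs.set i v).getD i 0 = v := by
  rw [List.getD_eq_getElem?_getD, List.getElem?_set]; simp [h]

theorem getD_set_ne (cs : List Int) (i j : Nat) (v : Int) (h : i ≠ j) :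
    (cs.set i v).getD j 0 = cs.getD j 0 := by
  rw [List.getD_eq_getElem?_getD, List.getElem?_set, if_neg h, ← List.getD_eq_getElem?_getD]

theorem potOf_set_ne (xs : List (String × Int)) (cs : List Int) (i j : Nat) (v : Int)
    (h : i ≠ j) : potOf xs (cs.set i v) j = potOf xs cs j := by
  unfold potOf; rw [getD_set_ne _ _ _ _ h]

theorem step_sim (xs : List (String × Int)) (kList : List String)
    (hnd : (xs.map Prod.fst).Nodup) (hpk : (xs.map Prod.fst).Perm kList)
    (h0 : 0 < xs.length)
    (dist : PySem.Dict String Int) (st : List Int × List (Int × Int))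
    (hR : SimR xs kList dist st) :
    SimR xs kList
      (dist.modify
        (xs.foldl (fun (acc : Int × String) kr =>
            if kr.2 ^ (dist.getD kr.1 0 + 1).toNat < acc.1
            then (kr.2 ^ (dist.getD kr.1 0 + 1).toNat, kr.1) else acc)
          ((PySem.List.pyGetD xs 0 ("", 0)).2 ^
              (dist.getD (PySem.List.pyGetD xs 0 ("", 0)).1 0 + 1).toNat,
            (PySem.List.pyGetD xs 0 ("", 0)).1)).2
        0 (· + 1))
      (match st.2 with
       | [] => st
       | (_, i) :: rest =>
         (st.1.set i.toNat (st.1.getD i.toNat 0 + 1),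
          insAsc
            ((PySem.List.pyGetD xs i ("", 0)).2 ^
                ((st.1.set i.toNat (st.1.getD i.toNat 0 + 1)).getD i.toNat 0 + 1).toNat, i)
            rest)) := by
  obtain ⟨cs, pq⟩ := st
  obtain ⟨hkeys, hlen, hgd, hperm, hpair⟩ := hR
  simp only at hlen hgd hperm hpair ⊢
  have hn : pq.length = xs.length := by
    rw [hperm.length_eq]; simp [pqOf]
  cases pq with
  | nil => exfalso; simp at hn; omega
  | cons hd rest =>
  obtain ⟨p, iZ⟩ := hd
  dsimp only
  -- the popped head is the entry of some sorted index i₀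
  have hmemhd : (p, iZ) ∈ pqOf xs cs := hperm.mem_iff.mp List.mem_cons_self
  simp only [pqOf, List.mem_map, List.mem_range] at hmemhd
  obtain ⟨i₀, hi₀, hfi⟩ := hmemhd
  have hp : potOf xs cs i₀ = p := congrArg Prod.fst hfi
  have hiZ : (i₀ : Int) = iZ := congrArg Prod.snd hfi
  have hiZt : iZ.toNat = i₀ := by omega
  have hhd : ∀ q ∈ rest, Lt2 (p, iZ) q := (List.pairwise_cons.mp hpair).1
  have hrest_mem : ∀ j, j < xs.length → j ≠ i₀ → (potOf xs cs j, (j : Int)) ∈ rest := by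
    intro j hj hne
    have hm : (potOf xs cs j, (j : Int)) ∈ pqOf xs cs := by
      simp only [pqOf, List.mem_map, List.mem_range]; exact ⟨j, hj, rfl⟩
    rcases List.mem_cons.mp (hperm.mem_iff.mpr hm) with he | hr
    · exfalso
      have : (j : Int) = iZ := congrArg Prod.snd he
      omega
    · exact hr
  have hmin : ∀ j, j < xs.length → potOf xs cs i₀ ≤ potOf xs cs j := by
    intro j hj
    by_cases hji : j = i₀
    · subst hji; exact le_refl _
    · have := hhd _ (hrest_mem j hj hji)
      simp only [Lt2] at this
      omega
  have hstrict : ∀ j, j < i₀ → potOf xs cs i₀ < potOf xs cs j := by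
    intro j hj
    have := hhd _ (hrest_mem j (lt_trans hj hi₀) (by omega))
    simp only [Lt2] at this
    omega
  -- A's scan finds exactly the leftmost argmin, which is i₀
  have hb : bestIdx xs cs xs.length = i₀ :=
    argmin_unique xs cs xs.length _ i₀ (bestIdx_lt xs cs xs.length (by omega)) hi₀
      (bestIdx_min xs cs xs.length) (bestIdx_strict xs cs xs.length)
      (fun j hj => hmin j hj) (fun j hj => hstrict j hj)
  have hA : (xs.foldl (fun (acc : Int × String) kr =>
            if kr.2 ^ (dist.getD kr.1 0 + 1).toNat < acc.1
            then (kr.2 ^ (dist.getD kr.1 0 + 1).toNat, kr.1) else acc)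
          ((PySem.List.pyGetD xs 0 ("", 0)).2 ^
              (dist.getD (PySem.List.pyGetD xs 0 ("", 0)).1 0 + 1).toNat,
            (PySem.List.pyGetD xs 0 ("", 0)).1)).2 = (xs.getD i₀ ("", 0)).1 := by
    rw [foldl_list_eq_range ("", 0) xs]
    rw [PySem.List.foldl_congr_mem _ _ (fun (acc : Int × String) j =>
        if potOf xs cs j < acc.1 then (potOf xs cs j, (xs.getD j ("", 0)).1) else acc) _ ?_]
    · have hinit : ((PySem.List.pyGetD xs 0 ("", 0)).2 ^
              (dist.getD (PySem.List.pyGetD xs 0 ("", 0)).1 0 + 1).toNat,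
            (PySem.List.pyGetD xs 0 ("", 0)).1)
          = (potOf xs cs 0, (xs.getD 0 ("", 0)).1) := by
        rw [PySem.List.pyGetD_zero]
        unfold potOf
        rw [hgd 0 h0]
      rw [hinit, scanA_spec xs cs xs.length, hb]
    · intro acc j hj
      have hj' : j < xs.length := List.mem_range.mp hj
      unfold potOf
      rw [hgd j hj']
  rw [hA]
  -- name the updated counts and pushed entry
  have hiZc : PySem.List.pyGetD xs iZ ("", 0) = xs.getD i₀ ("", 0) := by
    rw [← hiZ, PySem.List.pyGetD_natCast]
  have hcs'len : (cs.set iZ.toNat (cs.getD iZ.toNat 0 + 1)).length = xs.length := by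
    simp [hlen]
  have hnw : ((PySem.List.pyGetD xs iZ ("", 0)).2 ^
        ((cs.set iZ.toNat (cs.getD iZ.toNat 0 + 1)).getD iZ.toNat 0 + 1).toNat, iZ)
      = (potOf xs (cs.set i₀ (cs.getD i₀ 0 + 1)) i₀, ((i₀ : Int))) := by
    rw [hiZc, hiZt]
    unfold potOf
    rw [hiZ]
  -- range decomposition at i₀
  obtain ⟨l1, l2, hsplit⟩ := List.append_of_mem (List.mem_range.mpr hi₀)
  have hrnd : (List.range xs.length).Nodup := List.nodup_range
  rw [hsplit] at hrnd
  have hi₀l1 : i₀ ∉ l1 := by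
    rw [List.nodup_append] at hrnd
    intro hmem; exact (hrnd.2.2 i₀ hmem i₀ List.mem_cons_self) rfl
  have hi₀l2 : i₀ ∉ l2 := by
    rw [List.nodup_append, List.nodup_cons] at hrnd
    exact hrnd.2.1.1
  have hl1mem : ∀ j ∈ l1, j ≠ i₀ := fun j hj he => hi₀l1 (he ▸ hj)
  have hl2mem : ∀ j ∈ l2, j ≠ i₀ := fun j hj he => hi₀l2 (he ▸ hj)
  have hpq_dec : pqOf xs cs
      = (l1.map (fun i => (potOf xs cs i, (i : Int)))) ++ (potOf xs cs i₀, (i₀ : Int)) ::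
        (l2.map (fun i => (potOf xs cs i, (i : Int)))) := by
    rw [pqOf, hsplit]; simp
  have hrest : rest.Perm ((l1.map (fun i => (potOf xs cs i, (i : Int)))) ++
      (l2.map (fun i => (potOf xs cs i, (i : Int))))) := by
    have h1 : ((p, iZ) :: rest).Perm ((potOf xs cs i₀, (i₀ : Int)) ::
        ((l1.map (fun i => (potOf xs cs i, (i : Int)))) ++
         (l2.map (fun i => (potOf xs cs i, (i : Int)))))) :=
      hperm.trans (by rw [hpq_dec]; exact List.perm_middle)
    rw [← hfi] at h1
    exact h1.cons_inv
  constructor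
  · -- keys preserved
    rw [PySem.Dict.keys_modify, PySem.Dict.keys_insert_of_contains, hkeys]
    rw [PySem.Dict.contains_iff_mem_keys, hkeys]
    apply hpk.mem_iff.mp
    rw [List.mem_map]
    refine ⟨xs[i₀], List.getElem_mem hi₀, ?_⟩
    rw [List.getD_eq_getElem _ _ hi₀]
  refine ⟨by simp [hlen], ?_, ?_, ?_⟩
  · -- lookup correspondence
    intro i hi
    rw [PySem.Dict.getD_modify]
    rw [hiZt]
    by_cases hii : i = i₀
    · subst hii
      rw [if_pos rfl, getD_set_self _ _ _ (by omega), hgd i hi]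
    · rw [if_neg ?_, getD_set_ne _ _ _ _ (by omega), hgd i hi]
      intro he
      have h1 : (xs.map Prod.fst)[i]'(by simp [hi]) = (xs.map Prod.fst)[i₀]'(by simp [hi₀]) := by
        simp only [List.getElem_map]
        rw [← List.getD_eq_getElem xs ("", 0) hi, ← List.getD_eq_getElem xs ("", 0) hi₀]
        exact he
      exact hii ((hnd.getElem_inj_iff).mp h1)
  · -- permutation of the queue contents
    rw [hnw, hiZt]
    have htgt : pqOf xs (cs.set i₀ (cs.getD i₀ 0 + 1))
        = (l1.map (fun i => (potOf xs cs i, (i : Int)))) ++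
          (potOf xs (cs.set i₀ (cs.getD i₀ 0 + 1)) i₀, (i₀ : Int)) ::
          (l2.map (fun i => (potOf xs cs i, (i : Int)))) := by
      rw [pqOf, hsplit]
      simp only [List.map_append, List.map_cons]
      congr 1
      · exact List.map_congr_left (fun j hj => by
          rw [potOf_set_ne _ _ _ _ _ (fun he => hl1mem j hj he.symm)])
      · congr 1
        exact List.map_congr_left (fun j hj => by
          rw [potOf_set_ne _ _ _ _ _ (fun he => hl2mem j hj he.symm)])
    rw [htgt]
    refine ((insAsc_perm _ _).trans ?_)
    refine (List.Perm.cons _ hrest).trans ?_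
    exact List.perm_middle.symm
  · -- queue stays sorted
    rw [hnw]
    apply insAsc_pairwise _ _ (List.pairwise_cons.mp hpair).2
    intro y hy
    rcases List.mem_append.mp (hrest.mem_iff.mp hy) with hm | hm <;>
    · rw [List.mem_map] at hm
      obtain ⟨j, hj, hje⟩ := hm
      intro he
      have : (j : Int) = (i₀ : Int) := by
        have := congrArg Prod.snd (hje.trans he)
        simpa using this
      first
      | exact hl1mem j hj (by omega)
      | exact hl2mem j hj (by omega)

theorem enum_fst_map (xs : List (String × Int)) :
    (List.range xs.length).map (fun j => (xs.getD j ("", 0)).1) = xs.map Prod.fst := by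
  apply List.ext_getElem
  · simp
  · intro j h1 h2
    simp only [List.getElem_map, List.getElem_range]
    rw [List.getD_eq_getElem xs ("", 0) (by simpa using h2)]

theorem pos_items (xs : List (String × Int)) (hnd : (xs.map Prod.fst).Nodup) :
    ((PySem.List.enumerate xs).foldl (fun acc p => acc.insert p.2.1 p.1)
        (PySem.Dict.empty : PySem.Dict String Int)).items
      = (List.range xs.length).map (fun j => ((xs.getD j ("", 0)).1, (0 : Int) + (j : Int))) := by
  have hfresh : ∀ a ∈ PySem.List.enumerate xs,
      (PySem.Dict.empty : PySem.Dict String Int).contains a.2.1 = false :=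
    fun a _ => PySem.Dict.contains_empty _
  have hmnd : ((PySem.List.enumerate xs).map (fun p => p.2.1)).Nodup := by
    rw [enumerate_eq xs 0, List.map_map]
    have he : (List.map ((fun p => p.2.1) ∘ fun (j : Nat) => ((0 : Int) + (j : Int), xs.getD j ("", 0)))
        (List.range xs.length)) = xs.map Prod.fst := by
      rw [← enum_fst_map xs]; rfl
    rw [he]; exact hnd
  have h1 := PySem.Dict.items_foldl_insert_fresh (PySem.List.enumerate xs)
    (fun p => p.2.1) (fun p => p.1) (PySem.Dict.empty : PySem.Dict String Int) hfresh hmnd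
  rw [h1, enumerate_eq xs 0, List.map_map]
  rfl

theorem pos_keys (xs : List (String × Int)) (hnd : (xs.map Prod.fst).Nodup) :
    ((PySem.List.enumerate xs).foldl (fun acc p => acc.insert p.2.1 p.1)
        (PySem.Dict.empty : PySem.Dict String Int)).keys = xs.map Prod.fst := by
  show (((PySem.List.enumerate xs).foldl (fun acc p => acc.insert p.2.1 p.1)
        (PySem.Dict.empty : PySem.Dict String Int)).items).map Prod.fst = _
  rw [pos_items xs hnd, List.map_map, ← enum_fst_map xs]
  rfl

theorem pos_getD (xs : List (String × Int)) (hnd : (xs.map Prod.fst).Nodup)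
    (j : Nat) (hj : j < xs.length) :
    ((PySem.List.enumerate xs).foldl (fun acc p => acc.insert p.2.1 p.1)
        (PySem.Dict.empty : PySem.Dict String Int)).getD ((xs.getD j ("", 0)).1) 0 = (j : Int) := by
  have hmem : ((xs.getD j ("", 0)).1, (0 : Int) + (j : Int)) ∈
      ((PySem.List.enumerate xs).foldl (fun acc p => acc.insert p.2.1 p.1)
        (PySem.Dict.empty : PySem.Dict String Int)).items := by
    rw [pos_items xs hnd, List.mem_map]
    exact ⟨j, List.mem_range.mpr hj, rfl⟩
  have := PySem.Dict.getD_of_mem_items _ hmem (by rw [pos_keys xs hnd]; exact hnd) 0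
  rw [this]; ring

theorem init_sim (xs : List (String × Int)) (kList : List String)
    (hknd : kList.Nodup) (hpk : (xs.map Prod.fst).Perm kList)
    (hsort : ∀ p q : Nat, p ≤ q → q < xs.length →
      (xs.getD p ("", 0)).2 ≤ (xs.getD q ("", 0)).2) :
    SimR xs kList
      (kList.foldl (fun acc k => acc.insert k 0) (PySem.Dict.empty : PySem.Dict String Int))
      (List.replicate xs.length 0, (PySem.List.enumerate xs).map (fun p => (p.2.2, p.1))) := by
  have hnd : (xs.map Prod.fst).Nodup := hpk.nodup_iff.mpr hknd
  have hitems : (kList.foldl (fun acc k => acc.insert k 0)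
      (PySem.Dict.empty : PySem.Dict String Int)).items = kList.map (fun k => (k, (0 : Int))) := by
    have h1 := PySem.Dict.items_foldl_insert_fresh kList
      (fun k => k) (fun _ => (0 : Int)) (PySem.Dict.empty : PySem.Dict String Int)
      (fun a _ => PySem.Dict.contains_empty _) (by rw [List.map_id']; exact hknd)
    rw [h1]
    rfl
  have hkeys : (kList.foldl (fun acc k => acc.insert k 0)
      (PySem.Dict.empty : PySem.Dict String Int)).keys = kList := by
    show ((kList.foldl (fun acc k => acc.insert k 0)
      (PySem.Dict.empty : PySem.Dict String Int)).items).map Prod.fst = kList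
    rw [hitems, List.map_map]
    exact List.map_id' kList
  have hpq0 : (PySem.List.enumerate xs).map (fun p => (p.2.2, p.1))
      = pqOf xs (List.replicate xs.length 0) := by
    rw [enumerate_eq xs 0, List.map_map, pqOf]
    apply List.map_congr_left
    intro j hj
    have hj' : j < xs.length := List.mem_range.mp hj
    simp only [Function.comp]
    unfold potOf
    rw [List.getD_replicate _ hj']
    norm_num
  refine ⟨hkeys, by simp, ?_, ?_, ?_⟩
  · intro i hi
    have hmem : ((xs.getD i ("", 0)).1, (0 : Int)) ∈ (kList.foldl (fun acc k => acc.insert k 0)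
        (PySem.Dict.empty : PySem.Dict String Int)).items := by
      rw [hitems, List.mem_map]
      refine ⟨(xs.getD i ("", 0)).1, ?_, rfl⟩
      apply hpk.mem_iff.mp
      rw [List.mem_map]
      exact ⟨xs[i], List.getElem_mem hi, by rw [List.getD_eq_getElem xs ("", 0) hi]⟩
    rw [PySem.Dict.getD_of_mem_items _ hmem (by rw [hkeys]; exact hknd) 0]
    rw [List.getD_replicate _ (by simpa using hi)]
  · rw [hpq0]
  · rw [hpq0, pqOf, List.pairwise_iff_getElem]
    intro i j hi hj hij
    simp only [List.getElem_map, List.getElem_range]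
    have hi' : i < xs.length := by simpa using hi
    have hj' : j < xs.length := by simpa using hj
    have hle : potOf xs (List.replicate xs.length 0) i ≤ potOf xs (List.replicate xs.length 0) j := by
      unfold potOf
      rw [List.getD_replicate _ hi', List.getD_replicate _ hj']
      norm_num
      exact hsort i j (le_of_lt hij) hj'
    rcases lt_or_eq_of_le hle with h | h
    · exact Or.inl h
    · exact Or.inr ⟨h, by omega⟩

theorem keys_ofList_eq (ds : List (String × Int)) :
    (PySem.Dict.ofList ds).keys = PySem.Set.ofList (ds.map Prod.fst) := by
  show (List.foldl (fun acc p => acc.insert p.1 p.2) PySem.Dict.empty ds).keys = _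
  rw [PySem.Dict.keys_foldl_insert_key (key := Prod.fst) (f := fun _ p => p.2)]
  rw [show (PySem.Dict.empty : PySem.Dict String Int).keys = [] from rfl]
  exact PySem.Set.update_nil_left _

theorem master (ds : List (String × Int)) (F : Int) (hds : ds ≠ []) :
    ((((PySem.List.pyRange 0 F 1).foldl (fun (dist : PySem.Dict String Int) (_ : Int) =>
        dist.modify
          ((PySem.List.sorted (PySem.Dict.ofList ds).items (fun x => x.2) false).foldl (fun (acc : Int × String) kr =>
              if kr.2 ^ (dist.getD kr.1 0 + 1).toNat < acc.1
              then (kr.2 ^ (dist.getD kr.1 0 + 1).toNat, kr.1) else acc)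
            ((PySem.List.pyGetD (PySem.List.sorted (PySem.Dict.ofList ds).items (fun x => x.2) false) 0 ("", 0)).2 ^
                (dist.getD (PySem.List.pyGetD (PySem.List.sorted (PySem.Dict.ofList ds).items (fun x => x.2) false) 0 ("", 0)).1 0 + 1).toNat,
              (PySem.List.pyGetD (PySem.List.sorted (PySem.Dict.ofList ds).items (fun x => x.2) false) 0 ("", 0)).1)).2
          0 (· + 1)) ((PySem.Dict.ofList ds).keys.foldl (fun acc k => acc.insert k 0) (PySem.Dict.empty : PySem.Dict String Int)))).items,
     ((((((PySem.List.pyRange 0 F 1).foldl (fun (dist : PySem.Dict String Int) (_ : Int) =>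
        dist.modify
          ((PySem.List.sorted (PySem.Dict.ofList ds).items (fun x => x.2) false).foldl (fun (acc : Int × String) kr =>
              if kr.2 ^ (dist.getD kr.1 0 + 1).toNat < acc.1
              then (kr.2 ^ (dist.getD kr.1 0 + 1).toNat, kr.1) else acc)
            ((PySem.List.pyGetD (PySem.List.sorted (PySem.Dict.ofList ds).items (fun x => x.2) false) 0 ("", 0)).2 ^
                (dist.getD (PySem.List.pyGetD (PySem.List.sorted (PySem.Dict.ofList ds).items (fun x => x.2) false) 0 ("", 0)).1 0 + 1).toNat,
              (PySem.List.pyGetD (PySem.List.sorted (PySem.Dict.ofList ds).items (fun x => x.2) false) 0 ("", 0)).1)).2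
          0 (· + 1)) ((PySem.Dict.ofList ds).keys.foldl (fun acc k => acc.insert k 0) (PySem.Dict.empty : PySem.Dict String Int)))).keys).map (fun k => (PySem.Dict.ofList ds).getD k 0 ^ ((((PySem.List.pyRange 0 F 1).foldl (fun (dist : PySem.Dict String Int) (_ : Int) =>
        dist.modify
          ((PySem.List.sorted (PySem.Dict.ofList ds).items (fun x => x.2) false).foldl (fun (acc : Int × String) kr =>
              if kr.2 ^ (dist.getD kr.1 0 + 1).toNat < acc.1
              then (kr.2 ^ (dist.getD kr.1 0 + 1).toNat, kr.1) else acc)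
            ((PySem.List.pyGetD (PySem.List.sorted (PySem.Dict.ofList ds).items (fun x => x.2) false) 0 ("", 0)).2 ^
                (dist.getD (PySem.List.pyGetD (PySem.List.sorted (PySem.Dict.ofList ds).items (fun x => x.2) false) 0 ("", 0)).1 0 + 1).toNat,
              (PySem.List.pyGetD (PySem.List.sorted (PySem.Dict.ofList ds).items (fun x => x.2) false) 0 ("", 0)).1)).2
          0 (· + 1)) ((PySem.Dict.ofList ds).keys.foldl (fun acc k => acc.insert k 0) (PySem.Dict.empty : PySem.Dict String Int)))).getD k 0).toNat)).sum : Int),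
     (PySem.Dict.ofList (PySem.List.sorted (PySem.Dict.ofList ds).items (fun x => x.2) false)).items)
    = (((PySem.Dict.ofList ds).keys.foldl (fun acc k => acc.insert k ((((PySem.List.pyRange 0 F 1).foldl (fun (st : List Int × List (Int × Int)) (_ : Int) =>
        match st.2 with
        | [] => st
        | (_, i) :: rest =>
          (st.1.set i.toNat (st.1.getD i.toNat 0 + 1),
           insAsc
             ((PySem.List.pyGetD (PySem.List.sorted (PySem.Dict.ofList ds).items (fun x => x.2) false) i ("", 0)).2 ^
                 ((st.1.set i.toNat (st.1.getD i.toNat 0 + 1)).getD i.toNat 0 + 1).toNat, i)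
             rest)) (List.replicate (PySem.List.sorted (PySem.Dict.ofList ds).items (fun x => x.2) false).length 0, (PySem.List.enumerate (PySem.List.sorted (PySem.Dict.ofList ds).items (fun x => x.2) false)).map (fun p => (p.2.2, p.1))))).1.getD ((((PySem.List.enumerate (PySem.List.sorted (PySem.Dict.ofList ds).items (fun x => x.2) false)).foldl (fun acc p => acc.insert p.2.1 p.1) (PySem.Dict.empty : PySem.Dict String Int))).getD k 0).toNat 0))
          (PySem.Dict.empty : PySem.Dict String Int)).items,
       ((((PySem.Dict.ofList ds).items.map (fun kr => kr.2 ^ ((((PySem.List.pyRange 0 F 1).foldl (fun (st : List Int × List (Int × Int)) (_ : Int) =>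
        match st.2 with
        | [] => st
        | (_, i) :: rest =>
          (st.1.set i.toNat (st.1.getD i.toNat 0 + 1),
           insAsc
             ((PySem.List.pyGetD (PySem.List.sorted (PySem.Dict.ofList ds).items (fun x => x.2) false) i ("", 0)).2 ^
                 ((st.1.set i.toNat (st.1.getD i.toNat 0 + 1)).getD i.toNat 0 + 1).toNat, i)
             rest)) (List.replicate (PySem.List.sorted (PySem.Dict.ofList ds).items (fun x => x.2) false).length 0, (PySem.List.enumerate (PySem.List.sorted (PySem.Dict.ofList ds).items (fun x => x.2) false)).map (fun p => (p.2.2, p.1))))).1.getD ((((PySem.List.enumerate (PySem.List.sorted (PySem.Dict.ofList ds).items (fun x => x.2) false)).foldl (fun acc p => acc.insert p.2.1 p.1) (PySem.Dict.empty : PySem.Dict String Int))).getD kr.1 0).toNat 0).toNat))).sum : Int),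
       (PySem.Dict.ofList (PySem.List.sorted (PySem.Dict.ofList ds).items (fun x => x.2) false)).items) := by
  set d := PySem.Dict.ofList ds with hd
  set xs := PySem.List.sorted d.items (fun x => x.2) false with hxs
  have hknd : d.keys.Nodup := PySem.Dict.nodup_keys_ofList ds
  have hpk : (xs.map Prod.fst).Perm d.keys :=
    (PySem.List.sorted_perm d.items (fun x => x.2) false).map Prod.fst
  have hnd : (xs.map Prod.fst).Nodup := hpk.nodup_iff.mpr hknd
  have hx0 : 0 < xs.length := by
    rw [List.length_pos_iff]
    intro hnil
    obtain ⟨x, hx⟩ := List.exists_mem_of_ne_nil ds hds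
    have hk : x.1 ∈ d.keys := by
      rw [hd, keys_ofList_eq]
      exact (PySem.Set.mem_ofList _ _).mpr (List.mem_map_of_mem hx)
    rw [← hpk.mem_iff, hnil] at hk
    simp at hk
  have hsort : ∀ p q : Nat, p ≤ q → q < xs.length →
      (xs.getD p ("", 0)).2 ≤ (xs.getD q ("", 0)).2 := by
    intro p q hpq hq
    have hp : p < xs.length := lt_of_le_of_lt hpq hq
    rw [List.getD_eq_getElem xs ("", 0) hp, List.getD_eq_getElem xs ("", 0) hq]
    exact PySem.List.key_sorted_getElem_mono d.items (fun x => x.2) hpq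
      (by simpa [hxs, PySem.List.length_sorted] using hq)
  have hsim := foldl_sim (SimR xs d.keys) _ _
    (fun a b x h => step_sim xs d.keys hnd hpk hx0 a b h)
    (PySem.List.pyRange 0 F 1) _ _ (init_sim xs d.keys hknd hpk hsort)
  obtain ⟨hkeysF, hlenF, hgdF, -, -⟩ := hsim
  have hval : ∀ k, k ∈ d.keys →
      (((PySem.List.pyRange 0 F 1).foldl (fun (dist : PySem.Dict String Int) (_ : Int) =>
        dist.modify
          (xs.foldl (fun (acc : Int × String) kr =>
              if kr.2 ^ (dist.getD kr.1 0 + 1).toNat < acc.1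
              then (kr.2 ^ (dist.getD kr.1 0 + 1).toNat, kr.1) else acc)
            ((PySem.List.pyGetD xs 0 ("", 0)).2 ^
                (dist.getD (PySem.List.pyGetD xs 0 ("", 0)).1 0 + 1).toNat,
              (PySem.List.pyGetD xs 0 ("", 0)).1)).2
          0 (· + 1)) (d.keys.foldl (fun acc k => acc.insert k 0) (PySem.Dict.empty : PySem.Dict String Int)))).getD k 0 = (((PySem.List.pyRange 0 F 1).foldl (fun (st : List Int × List (Int × Int)) (_ : Int) =>
        match st.2 with
        | [] => st
        | (_, i) :: rest =>
          (st.1.set i.toNat (st.1.getD i.toNat 0 + 1),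
           insAsc
             ((PySem.List.pyGetD xs i ("", 0)).2 ^
                 ((st.1.set i.toNat (st.1.getD i.toNat 0 + 1)).getD i.toNat 0 + 1).toNat, i)
             rest)) (List.replicate xs.length 0, (PySem.List.enumerate xs).map (fun p => (p.2.2, p.1))))).1.getD ((((PySem.List.enumerate xs).foldl (fun acc p => acc.insert p.2.1 p.1) (PySem.Dict.empty : PySem.Dict String Int))).getD k 0).toNat 0 := by
    intro k hk
    obtain ⟨a, ha, hak⟩ := List.mem_map.mp (hpk.mem_iff.mpr hk)
    obtain ⟨j, hj, hja⟩ := List.mem_iff_getElem.mp ha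
    have hkj : k = (xs.getD j ("", 0)).1 := by
      rw [List.getD_eq_getElem xs ("", 0) hj, hja, hak]
    rw [hkj, hgdF j hj, pos_getD xs hnd j hj]
    simp
  set A := ((PySem.List.pyRange 0 F 1).foldl (fun (dist : PySem.Dict String Int) (_ : Int) =>
        dist.modify
          (xs.foldl (fun (acc : Int × String) kr =>
              if kr.2 ^ (dist.getD kr.1 0 + 1).toNat < acc.1
              then (kr.2 ^ (dist.getD kr.1 0 + 1).toNat, kr.1) else acc)
            ((PySem.List.pyGetD xs 0 ("", 0)).2 ^
                (dist.getD (PySem.List.pyGetD xs 0 ("", 0)).1 0 + 1).toNat,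
              (PySem.List.pyGetD xs 0 ("", 0)).1)).2
          0 (· + 1)) (d.keys.foldl (fun acc k => acc.insert k 0) (PySem.Dict.empty : PySem.Dict String Int))) with hA
  set B := ((PySem.List.pyRange 0 F 1).foldl (fun (st : List Int × List (Int × Int)) (_ : Int) =>
        match st.2 with
        | [] => st
        | (_, i) :: rest =>
          (st.1.set i.toNat (st.1.getD i.toNat 0 + 1),
           insAsc
             ((PySem.List.pyGetD xs i ("", 0)).2 ^
                 ((st.1.set i.toNat (st.1.getD i.toNat 0 + 1)).getD i.toNat 0 + 1).toNat, i)
             rest)) (List.replicate xs.length 0, (PySem.List.enumerate xs).map (fun p => (p.2.2, p.1)))) with hB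
  set P := ((PySem.List.enumerate xs).foldl (fun acc p => acc.insert p.2.1 p.1) (PySem.Dict.empty : PySem.Dict String Int)) with hP
  refine congrArg₂ Prod.mk ?_ (congrArg₂ Prod.mk ?_ rfl)
  · rw [dict_items_eq _ (by rw [hkeysF]; exact hknd), hkeysF]
    have h1 := PySem.Dict.items_foldl_insert_fresh d.keys (fun k => k)
      (fun k => B.1.getD ((P.getD k 0).toNat) 0)
      (PySem.Dict.empty : PySem.Dict String Int)
      (fun a _ => PySem.Dict.contains_empty _) (by rw [List.map_id']; exact hknd)
    rw [h1]
    exact List.map_congr_left (fun k hk => by rw [hval k hk])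
  · congr 1
    rw [hkeysF]
    rw [show d.keys = d.items.map Prod.fst from rfl, List.map_map]
    apply List.map_congr_left
    intro kr hkr
    simp only [Function.comp]
    have h2 : d.getD kr.1 0 = kr.2 :=
      PySem.Dict.getD_of_mem_items d (by rw [Prod.mk.eta]; exact hkr) hknd 0
    have hk : kr.1 ∈ d.keys := by
      rw [show d.keys = d.items.map Prod.fst from rfl]
      exact List.mem_map_of_mem hkr
    rw [h2, hval kr.1 hk]

-- ===== VERDICT (by name: the statement is the Claim_ definition above) =====
theorem distribute_fragments_spec : Claim_equal_distribute_fragments := by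
  intro ds F hdom hpre
  show distribute_fragments ds F = distribute_fragments_alt ds F
  by_cases hds : ds = []
  · subst hds
    have hF : F ≤ 0 := hpre rfl
    have hr : PySem.List.pyRange 0 F 1 = [] := by
      rw [List.eq_nil_iff_forall_not_mem]
      intro x hx
      have := PySem.List.mem_pyRange_one.mp hx
      omega
    simp [distribute_fragments, distribute_fragments_alt, hr]
    rfl
  · exact master ds F hds
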